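-- pv_equiv track=rewrite | github.com/MMala874/MVP-Multi-Asset | strategies/s1_trend_breakout_donchian.py | _parse_regime_snapshot
-- ===== SOURCE A (Python) =====
-- def _parse_regime_snapshot(regime_str: str) -> tuple[str, int]:
--     """
--     Parse regime_snapshot format: "VOL=<LOW|MID|HIGH>|SPIKE=<0|1>"
--     Returns: (vol_regime, spike_flag)
--     """
--     try:
--         parts = regime_str.split("|")
--         vol_part = [p for p in parts if p.startswith("VOL=")]
--         spike_part = [p for p in parts if p.startswith("SPIKE=")]
--
--         vol = vol_part[0].replace("VOL=", "") if vol_part else "UNKNOWN"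
--         spike = int(spike_part[0].replace("SPIKE=", "")) if spike_part else 0
--
--         return vol, spike
--     except (AttributeError, IndexError, ValueError):
--         return "UNKNOWN", 0
-- ===== SOURCE B (Python) =====
-- def _parse_regime_snapshot(regime_str: str) -> tuple[str, int]:
--     # One pass: index each part by its text before the first '=' (first occurrence wins), then look up.
--     try:
--         index = {}
--         for part in regime_str.split("|"):
--             eq = part.find("=")
--             if eq >= 0:
--                 key = part[:eq]
--                 if key not in index:
--                     index[key] = part
--         vol_entry = index.get("VOL")
--         spike_entry = index.get("SPIKE")
--         vol = vol_entry.replace("VOL=", "") if vol_entry is not None else "UNKNOWN"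
--         spike = int(spike_entry.replace("SPIKE=", "")) if spike_entry is not None else 0
--         return vol, spike
--     except (AttributeError, IndexError, ValueError):
--         return "UNKNOWN", 0
-- ===== Notes on version B (the rewrite author's own statement) =====
-- stated objective: idiomatic
-- what changed: Replaces A's two separate filter scans over the split parts by a single pass that builds a dict indexing each part by the text before its first '=' (first occurrence kept), then derives vol and spike by two dict lookups.
import Mathlib
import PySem

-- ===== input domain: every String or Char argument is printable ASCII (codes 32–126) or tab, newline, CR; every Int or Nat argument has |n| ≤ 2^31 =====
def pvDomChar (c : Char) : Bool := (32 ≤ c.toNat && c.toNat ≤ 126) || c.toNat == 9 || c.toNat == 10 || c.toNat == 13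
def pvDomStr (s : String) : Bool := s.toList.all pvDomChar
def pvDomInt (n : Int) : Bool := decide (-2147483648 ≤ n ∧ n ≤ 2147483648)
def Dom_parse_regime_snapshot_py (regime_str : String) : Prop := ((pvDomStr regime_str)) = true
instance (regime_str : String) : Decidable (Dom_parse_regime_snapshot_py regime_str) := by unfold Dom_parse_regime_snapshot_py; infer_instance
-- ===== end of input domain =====

-- B replaces A's two filter scans by one pass that indexes each part by its key (text before the
-- first '='), first occurrence kept, then looks up "VOL" and "SPIKE" (objective: idiomatic).

-- ===== PORT A =====
def parse_regime_snapshot_py (regime_str : String) : String × Int :=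
  let parts := (PySem.Str.split? regime_str "|").getD []      -- "|" ≠ "", so split? is `some`
  let vol_part := parts.filter (fun p => PySem.Str.startswith p "VOL=")
  let spike_part := parts.filter (fun p => PySem.Str.startswith p "SPIKE=")
  let vol := match vol_part with
    | [] => "UNKNOWN"
    | v :: _ => PySem.Str.replace v "VOL=" ""
  match spike_part with
  | [] => (vol, 0)
  | sp :: _ =>
    match PySem.Int.ofStr? (PySem.Str.replace sp "SPIKE=" "") with
    | some n => (vol, n)                                      -- int(...) succeeded
    | none => ("UNKNOWN", 0)                                  -- ValueError caught by the except

-- ===== PORT B =====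
-- loop body of Source B: index[part[:part.find("=")]] = part (first occurrence only, parts with '=')
def pvIndexStep (d : PySem.Dict String String) (part : String) : PySem.Dict String String :=
  let eq := PySem.Str.find part "="
  if 0 ≤ eq then
    let key := PySem.Str.slice part none (some eq)
    if d.contains key then d else d.insert key part
  else d

def parse_regime_snapshot_py_alt (regime_str : String) : String × Int :=
  let parts := (PySem.Str.split? regime_str "|").getD []
  let index := parts.foldl pvIndexStep PySem.Dict.empty
  let vol := match index.get? "VOL" with
    | some e => PySem.Str.replace e "VOL=" ""
    | none => "UNKNOWN"
  match index.get? "SPIKE" with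
  | none => (vol, 0)
  | some e =>
    match PySem.Int.ofStr? (PySem.Str.replace e "SPIKE=" "") with
    | some n => (vol, n)
    | none => ("UNKNOWN", 0)

-- ===== PRECONDITION & SPEC =====
def Spec_parse_regime_snapshot_py (regime_str : String) (out : String × Int) : Prop := out = parse_regime_snapshot_py_alt regime_str
instance (regime_str : String) (out : String × Int) : Decidable (Spec_parse_regime_snapshot_py regime_str out) := by unfold Spec_parse_regime_snapshot_py; infer_instance

-- ===== CLAIM (what is proved, stated in full; the proofs are below) =====
def Claim_equal_parse_regime_snapshot_py : Prop := ∀ (regime_str : String), Dom_parse_regime_snapshot_py regime_str → Spec_parse_regime_snapshot_py regime_str (parse_regime_snapshot_py regime_str)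

-- ===== LEMMAS AND PROOFS =====

-- ['='] is a prefix of cs.drop n exactly when cs[n] = '='
lemma pv_single_prefix_drop (cs : List Char) (n : Nat) :
    (['='] : List Char) <+: cs.drop n ↔ cs[n]? = some '=' := by
  rw [← List.head?_drop]
  cases h : cs.drop n with
  | nil => simp
  | cons a t => simp [List.cons_prefix_cons, eq_comm]

-- a part starts with "K=" (K without '=') iff its first '=' exists and the text before it is K
lemma pv_match_char (ks cs : List Char) (hk : ('=' : Char) ∉ ks) :
    PySem.Chars.startswith cs (ks ++ ['=']) = true ↔
      0 ≤ PySem.Chars.find cs ['='] ∧ cs.take (PySem.Chars.find cs ['=']).toNat = ks := by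
  rw [PySem.Chars.startswith_iff]
  constructor
  · rintro ⟨t, ht⟩
    have hcs : cs = ks ++ '=' :: t := by rw [← ht]; simp
    have hf : 0 ≤ PySem.Chars.find cs ['='] :=
      (PySem.Chars.find_nonneg_iff cs ['=']).mpr ⟨ks, t, by rw [hcs]; simp⟩
    obtain ⟨hpre, hmin⟩ := PySem.Chars.find_spec hf
    set F := (PySem.Chars.find cs ['=']).toNat with hF
    have hlen : F = ks.length := by
      by_contra hne
      rcases Nat.lt_or_ge F ks.length with hlt | hge
      · have h1 : cs[F]? = some '=' := (pv_single_prefix_drop cs F).mp hpre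
        rw [hcs, List.getElem?_append_left hlt] at h1
        exact hk (List.mem_of_getElem? h1)
      · have hlt2 : ks.length < F := lt_of_le_of_ne hge (Ne.symm hne)
        apply hmin ks.length hlt2
        rw [hcs, List.drop_left]
        exact ⟨t, rfl⟩
    refine ⟨hf, ?_⟩
    rw [hcs, hlen, List.take_left]
  · rintro ⟨hf, htake⟩
    obtain ⟨hpre, -⟩ := PySem.Chars.find_spec hf
    obtain ⟨t, ht⟩ := hpre
    refine ⟨t, ?_⟩
    conv_rhs => rw [← List.take_append_drop (PySem.Chars.find cs ['=']).toNat cs]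
    rw [htake, ← ht]
    simp

-- the same fact at String level, phrased with the expressions B's loop computes
lemma pv_match_str (k p : String) (hk : ('=' : Char) ∉ k.toList) :
    PySem.Str.startswith p (k ++ "=") = true ↔
      0 ≤ PySem.Str.find p "=" ∧ PySem.Str.slice p none (some (PySem.Str.find p "=")) = k := by
  have h1 : (k ++ "=").toList = k.toList ++ ['='] := by
    have h2 : ("=" : String).toList = ['='] := by decide
    simp [h2]
  have h2 : ("=" : String).toList = ['='] := by decide
  rw [PySem.Str.startswith_eq, PySem.Str.find_eq, h1, h2, pv_match_char k.toList p.toList hk]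
  apply and_congr_right
  intro hf
  rw [← String.toList_inj, PySem.Str.toList_slice, PySem.Chars.slice_eq_listSlice,
    PySem.List.slice_to _ hf]

-- B's index lookup at a key K without '=' is the FIRST part starting with "K=" — exactly A's filter[0]
lemma pv_fold_get (k : String) (hk : ('=' : Char) ∉ k.toList) (parts : List String) :
    ∀ d : PySem.Dict String String,
      (parts.foldl pvIndexStep d).get? k =
        Option.or (d.get? k)
          (parts.filter (fun p => PySem.Str.startswith p (k ++ "="))).head? := by
  induction parts with
  | nil => intro d; simp
  | cons p rest ih =>
    intro d
    rw [List.foldl_cons, List.filter_cons, ih]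
    by_cases hm : PySem.Str.startswith p (k ++ "=") = true
    · obtain ⟨hf, hkey⟩ := (pv_match_str k p hk).mp hm
      simp only [hm, if_true]
      cases hc : d.contains k with
      | true =>
        have hv : ∃ v, d.get? k = some v := by
          cases hv : d.get? k with
          | none => rw [PySem.Dict.get?_eq_none_iff_contains] at hv; rw [hv] at hc; cases hc
          | some v => exact ⟨v, rfl⟩
        obtain ⟨v, hv⟩ := hv
        simp only [pvIndexStep, if_pos hf, hkey, hc, if_true, hv, Option.some_or]
      | false =>
        have hv : d.get? k = none := (PySem.Dict.get?_eq_none_iff_contains d k).mpr hc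
        simp only [pvIndexStep, if_pos hf, hkey, hc, Bool.false_eq_true, if_false, hv,
          PySem.Dict.get?_insert_self, Option.some_or, Option.none_or, List.head?_cons]
    · have hm' : PySem.Str.startswith p (k ++ "=") = false := by
        simpa using hm
      simp only [hm', Bool.false_eq_true, if_false]
      have hstep : (pvIndexStep d p).get? k = d.get? k := by
        simp only [pvIndexStep]
        split_ifs with hf hc
        · rfl
        · have hne : k ≠ PySem.Str.slice p none (some (PySem.Str.find p "=")) := by
            intro he
            exact hm ((pv_match_str k p hk).mpr ⟨hf, he.symm⟩)
          exact PySem.Dict.get?_insert_of_ne d p hne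
        · rfl
      rw [hstep]

-- ===== VERDICT (by name: the statement is the Claim_ definition above) =====
theorem parse_regime_snapshot_py_spec : Claim_equal_parse_regime_snapshot_py := by
  intro s _
  unfold Spec_parse_regime_snapshot_py parse_regime_snapshot_py parse_regime_snapshot_py_alt
  have hVol : ('=' : Char) ∉ ("VOL" : String).toList := by decide
  have hSpike : ('=' : Char) ∉ ("SPIKE" : String).toList := by decide
  have hV : ("VOL" ++ "=" : String) = "VOL=" := by decide
  have hS : ("SPIKE" ++ "=" : String) = "SPIKE=" := by decide
  have hempty : ∀ x : String, (PySem.Dict.empty : PySem.Dict String String).get? x = none := by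
    intro x; simp [PySem.Dict.empty, PySem.Dict.get?]
  have hVget := pv_fold_get "VOL" hVol ((PySem.Str.split? s "|").getD []) PySem.Dict.empty
  have hSget := pv_fold_get "SPIKE" hSpike ((PySem.Str.split? s "|").getD []) PySem.Dict.empty
  rw [hV] at hVget
  rw [hS] at hSget
  rw [hempty, Option.none_or] at hVget hSget
  simp only [hVget, hSget]
  cases hv : ((PySem.Str.split? s "|").getD []).filter (fun p => PySem.Str.startswith p "VOL=") with
  | nil =>
    cases hs : ((PySem.Str.split? s "|").getD []).filter
        (fun p => PySem.Str.startswith p "SPIKE=") with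
    | nil => simp
    | cons sp tl => cases PySem.Int.ofStr? (PySem.Str.replace sp "SPIKE=" "") <;> simp
  | cons v tl =>
    cases hs : ((PySem.Str.split? s "|").getD []).filter
        (fun p => PySem.Str.startswith p "SPIKE=") with
    | nil => simp
    | cons sp tl' => cases PySem.Int.ofStr? (PySem.Str.replace sp "SPIKE=" "") <;> simp
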